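-- pv_equiv track=rewrite | github.com/pokuk76/kFFT | datagen.py | _calculate_modulus
-- ===== SOURCE A (Python) =====
-- from collections.abc import Iterable
--
-- def _calculate_modulus(x: Iterable, N):
--     """
--     Calculate the smallest p that works for given input vector X
--     """
--     min_p = max(x)
--     m = 1
--     p = m*N + 1
--     while p < min_p:
--         p = m*N + 1
--         m += 1
--
--     return p
-- ===== SOURCE B (Python) =====
-- def _calculate_modulus(x, N):
--     """
--     Calculate the smallest p that works for given input vector X
--     """
--     M = max(x)
--     if M <= N + 1:
--         return N + 1
--     # ceil((M-1)/N) via floor division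
--     k = -((1 - M) // N)
--     return k * N + 1
-- ===== Notes on version B (the rewrite author's own statement) =====
-- stated objective: alternative
-- what changed: Replaced the linear trial loop over m=1,2,... with a single closed-form ceiling division k = ceil((max(x)-1)/N), p = k*N+1; it trades the loop for one arithmetic formula (the measured cost is dominated by max(x) either way).
import Mathlib
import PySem

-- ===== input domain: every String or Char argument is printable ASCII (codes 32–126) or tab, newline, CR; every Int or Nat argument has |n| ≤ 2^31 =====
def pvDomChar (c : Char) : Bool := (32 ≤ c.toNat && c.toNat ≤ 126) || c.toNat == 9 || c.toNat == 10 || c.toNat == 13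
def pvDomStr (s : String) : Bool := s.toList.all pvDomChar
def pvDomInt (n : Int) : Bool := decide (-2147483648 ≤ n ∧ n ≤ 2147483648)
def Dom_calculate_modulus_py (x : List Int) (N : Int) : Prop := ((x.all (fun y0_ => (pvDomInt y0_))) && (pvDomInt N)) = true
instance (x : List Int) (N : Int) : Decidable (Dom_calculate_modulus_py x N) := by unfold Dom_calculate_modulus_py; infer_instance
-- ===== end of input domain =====

-- B replaces A's linear trial loop over m = 1, 2, … with one closed-form ceiling division (objective: alternative).

-- ===== PORT A =====
-- A's while loop: while p < min_p: p = m*N + 1; m += 1.  Fuel only makes the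
-- recursion total; on every input admitted by Pre_ the fuel is never exhausted.
def loopA (fuel : Nat) (min_p N m p : Int) : Int :=
  match fuel with
  | 0 => p
  | f + 1 => if p < min_p then loopA f min_p N (m + 1) (m * N + 1) else p

def calculate_modulus_py (x : List Int) (N : Int) : Int :=
  match PySem.List.max? x (fun y => y) with
  | none => 0   -- max([]) raises ValueError; excluded by Pre_
  | some min_p => loopA (min_p.natAbs + 2) min_p N 1 (1 * N + 1)

-- ===== PORT B =====
def calculate_modulus_py_alt (x : List Int) (N : Int) : Int :=
  match PySem.List.max? x (fun y => y) with
  | none => 0   -- max([]) raises ValueError; excluded by Pre_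
  | some M =>
    if M ≤ N + 1 then N + 1
    else (-(PySem.Int.floordiv (1 - M) N)) * N + 1

-- ===== PRECONDITION & SPEC =====
-- Pre_ excludes exactly where A does not return: max([]) raises ValueError, and
-- for N ≤ 0 with some element exceeding N+1 the while loop never terminates.
def Pre_calculate_modulus_py (x : List Int) (N : Int) : Prop :=
  x ≠ [] ∧ (1 ≤ N ∨ ∀ y ∈ x, y ≤ N + 1)
instance (x : List Int) (N : Int) : Decidable (Pre_calculate_modulus_py x N) := by
  unfold Pre_calculate_modulus_py; infer_instance

def pvWitness_calculate_modulus_py : List Int × Int := ([5, -3, 12], 4)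

def Spec_calculate_modulus_py (x : List Int) (N : Int) (out : Int) : Prop := out = calculate_modulus_py_alt x N
instance (x : List Int) (N : Int) (out : Int) : Decidable (Spec_calculate_modulus_py x N out) := by unfold Spec_calculate_modulus_py; infer_instance

-- ===== CLAIM (what is proved, stated in full; the proofs are below) =====
def Claim_equal_calculate_modulus_py : Prop := ∀ (x : List Int) (N : Int), Dom_calculate_modulus_py x N → Pre_calculate_modulus_py x N → Spec_calculate_modulus_py x N (calculate_modulus_py x N)

-- ===== LEMMAS AND PROOFS =====

lemma loopA_zero (min_p N m p : Int) : loopA 0 min_p N m p = p := rfl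

lemma loopA_succ (f : Nat) (min_p N m p : Int) :
    loopA (f + 1) min_p N m p =
      if p < min_p then loopA f min_p N (m + 1) (m * N + 1) else p := rfl

-- Loop invariant: from a state m ≥ 2, p = (m-1)*N + 1, with enough fuel, the loop
-- returns the closed-form ceiling value as soon as p is still below min_p.
lemma loopA_eq (f : Nat) : ∀ (M N m : Int), 1 ≤ N → 2 ≤ m →
    M - ((m - 1) * N + 1) ≤ (f : Int) →
    loopA f M N m ((m - 1) * N + 1) =
      if (m - 1) * N + 1 < M then (-(PySem.Int.floordiv (1 - M) N)) * N + 1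
      else (m - 1) * N + 1 := by
  induction f with
  | zero =>
    intro M N m hN hm hf
    rw [loopA_zero, if_neg (by omega)]
  | succ f ih =>
    intro M N m hN hm hf
    rw [loopA_succ]
    by_cases hlt : (m - 1) * N + 1 < M
    · rw [if_pos hlt, if_pos hlt]
      have hstep : m * N + 1 = ((m + 1) - 1) * N + 1 := by ring
      rw [hstep]
      have hf' : M - (((m + 1) - 1) * N + 1) ≤ (f : Int) := by
        have : ((m + 1) - 1) * N + 1 = ((m - 1) * N + 1) + N := by ring
        push_cast at hf ⊢
        omega
      rw [ih M N (m + 1) hN (by omega) hf']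
      by_cases h2 : ((m + 1) - 1) * N + 1 < M
      · rw [if_pos h2]
      · rw [if_neg h2]
        -- loop exits at p = m*N+1, and m is exactly the ceiling ceil((M-1)/N)
        have hceil : -(PySem.Int.floordiv (-(M - 1)) N) = m := by
          rw [PySem.Int.neg_floordiv_neg_eq_iff_of_pos (by omega)]
          constructor <;> nlinarith
        have h1M : (1 : Int) - M = -(M - 1) := by ring
        rw [h1M, hceil]
        ring
    · rw [if_neg hlt, if_neg hlt]

theorem calculate_modulus_py_spec : Claim_equal_calculate_modulus_py := by
  intro x N _hdom hpre
  unfold Spec_calculate_modulus_py calculate_modulus_py calculate_modulus_py_alt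
  obtain ⟨hne, hN⟩ := hpre
  cases hmax : PySem.List.max? x (fun y => y) with
  | none =>
    exact absurd ((PySem.List.max?_eq_none_iff x (fun y => y)).mp hmax) hne
  | some M =>
    show loopA (M.natAbs + 2) M N 1 (1 * N + 1) =
      if M ≤ N + 1 then N + 1 else (-(PySem.Int.floordiv (1 - M) N)) * N + 1
    by_cases hM : M ≤ N + 1
    · -- loop guard is false on entry; both sides return N + 1
      rw [loopA_succ, if_neg (by omega), if_pos hM]
      ring
    · -- some element exceeds N+1, so Pre_ forces 1 ≤ N
      have h1N : 1 ≤ N := by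
        rcases hN with h | h
        · exact h
        · exact absurd (h M (PySem.List.max?_mem hmax)) hM
      -- one unfolding performs A's first (no-op) iteration, reaching state m = 2
      rw [loopA_succ, if_pos (by omega)]
      have hp : (1 : Int) * N + 1 = (2 - 1) * N + 1 := by ring
      have h11 : (1 : Int) + 1 = 2 := by norm_num
      rw [hp, h11, loopA_eq (M.natAbs + 1) M N 2 h1N (by omega)
        (by have h : ((2 : Int) - 1) * N = N := by ring
            rw [h]; omega)]
      rw [if_pos (by omega), if_neg hM]
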